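-- pv_equiv track=rewrite | github.com/nikolasfil/DigitalCommunications | Assignment-3/assignment_3.py | length_word_checker
-- ===== SOURCE A (Python) =====
-- from collections import defaultdict
--
-- def create_grouped_dict(dictionary):
--     """Returns a dictionary with keys the length of the values and values a sorted list of dictionaries"""
--
--     grouped_dict = defaultdict(list)
--     for value, index in dictionary.items():
--         temp_d = {value: index}
--         temp_key = len(str(value))
--         grouped_dict[temp_key].append(temp_d)
--         grouped_dict[temp_key].sort(key=lambda x: list(x.keys())[0])
--     return grouped_dict
--
-- def length_word_checker(word, w, dictionary):
--     """Checker for the same length words in the dictionary and returns the biggest one"""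
--     temp_list = [0, 0]
--     grouped_dict = create_grouped_dict(dictionary)
--
--     temp_length = len(word)
--
--     temp_sorted_length_list = [list(i.keys())[0] for i in grouped_dict[temp_length]]
--
--     temp_sorted_length_list = sorted(temp_sorted_length_list, key=lambda x: int(x, 2))
--
--     for same_length_word in temp_sorted_length_list:
--         # means that both words start the same
--         if same_length_word.startswith(w):
--             #     # if the same_length_word is bigger than the word we are checking then we found the small word, that means 1
--             if same_length_word > word:
--                 temp_list[1] = 0
--             elif same_length_word < word:
--                 temp_list[1] = 1
--
--     return temp_list[1]
-- ===== SOURCE B (Python) =====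
-- def length_word_checker(word, w, dictionary):
--     """Checker for the same length words in the dictionary and returns the biggest one"""
--     best = None
--     best_val = 0
--     for k in dictionary:
--         if len(k) == len(word) and k.startswith(w) and k != word:
--             v = int(k, 2)
--             if best is None or v > best_val:
--                 best, best_val = k, v
--     return 1 if best is not None and best < word else 0
-- ===== Notes on version B (the rewrite author's own statement) =====
-- stated objective: faster
-- what changed: Replaces building a length-grouped dict with a sort after every insertion plus a final key-sort of the matching bucket by a single pass over the dictionary that keeps the running int(k,2)-maximal same-length candidate.
-- outside the precondition, e.g. on length_word_checker('0x', '', {'+1': 0, '1 ': 1}): A returns 0, B returns 1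
import Mathlib
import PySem

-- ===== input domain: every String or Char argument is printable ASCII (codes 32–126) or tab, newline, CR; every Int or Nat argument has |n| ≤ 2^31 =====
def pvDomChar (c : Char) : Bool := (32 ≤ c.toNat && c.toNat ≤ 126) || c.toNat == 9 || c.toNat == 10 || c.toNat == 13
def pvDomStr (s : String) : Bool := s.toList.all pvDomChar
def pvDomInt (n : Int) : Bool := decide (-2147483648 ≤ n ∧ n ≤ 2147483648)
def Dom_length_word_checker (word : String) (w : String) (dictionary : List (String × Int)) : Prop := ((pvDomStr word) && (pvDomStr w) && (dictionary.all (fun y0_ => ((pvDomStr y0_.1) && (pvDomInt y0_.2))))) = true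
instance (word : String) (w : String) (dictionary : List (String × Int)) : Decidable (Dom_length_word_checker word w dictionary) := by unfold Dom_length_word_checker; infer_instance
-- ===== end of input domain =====

-- B replaces A's per-insertion bucket sorts and final key-sort by one pass keeping the int(k,2)-maximal candidate (return value only; neither version mutates its arguments).

-- ===== PORT A =====
-- int(s, 2); the `.getD 0` only totalizes inputs where Python raises ValueError (excluded by Pre_)
def pvBinKey (s : String) : Int := (PySem.Int.ofStrBase? s 2).getD 0
-- list(x.keys())[0] of a singleton dict {value: index}
def pvSingKey (d : PySem.Dict String Int) : String := PySem.List.pyGetD d.keys 0 ""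
-- the body of A's grouping loop: grouped_dict[len(value)].append({value: index}); .sort(key=first key)
def pvGroupStep (g : PySem.Dict Int (List (PySem.Dict String Int))) (p : String × Int) :
    PySem.Dict Int (List (PySem.Dict String Int)) :=
  g.modify (PySem.Str.len p.1) [] (fun b => PySem.List.sorted (b ++ [PySem.Dict.ofList [(p.1, p.2)]]) pvSingKey false)

def create_grouped_dict (dictionary : List (String × Int)) : PySem.Dict Int (List (PySem.Dict String Int)) :=
  (PySem.Dict.ofList dictionary).items.foldl pvGroupStep PySem.Dict.empty

def length_word_checker (word : String) (w : String) (dictionary : List (String × Int)) : Int :=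
  let grouped := create_grouped_dict dictionary
  let temp_length := PySem.Str.len word
  let temp_sorted_length_list := (grouped.getD temp_length []).map pvSingKey
  let temp_sorted_length_list' := PySem.List.sorted temp_sorted_length_list pvBinKey false
  temp_sorted_length_list'.foldl
    (fun acc s =>
      if PySem.Str.startswith s w then
        if word < s then 0 else if s < word then 1 else acc
      else acc) 0

-- ===== PORT B =====
-- len(k) == len(word) and k.startswith(w) and k != word
def pvCand (word : String) (w : String) (k : String) : Bool :=
  PySem.Str.len k == PySem.Str.len word && PySem.Str.startswith k w && k != word

-- the body of B's loop: keep the int(k,2)-larger of the running best and the next candidate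
def pvBStep (word : String) (w : String) (best : Option (String × Int)) (p : String × Int) :
    Option (String × Int) :=
  if pvCand word w p.1 then
    match best with
    | none => some (p.1, pvBinKey p.1)
    | some bv => if bv.2 < pvBinKey p.1 then some (p.1, pvBinKey p.1) else some bv
  else best

def length_word_checker_alt (word : String) (w : String) (dictionary : List (String × Int)) : Int :=
  let best := dictionary.foldl (pvBStep word w) (none : Option (String × Int))
  match best with
  | some bv => if bv.1 < word then 1 else 0
  | none => 0

-- ===== PRECONDITION & SPEC =====
-- Pre_ excludes (a) inputs where some dictionary word of the same length as `word` is not int(·,2)-parseable — there A raises ValueError —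
-- and (b) dictionaries where two distinct same-length spellings share one int(·,2) value (e.g. ' 1' and '+1'): on that defensible corner
-- A's result is an accident of stable-sort tie order versus its string comparisons.
def Pre_length_word_checker (word : String) (w : String) (dictionary : List (String × Int)) : Prop :=
  (∀ p ∈ dictionary, PySem.Str.len p.1 = PySem.Str.len word → (PySem.Int.ofStrBase? p.1 2).isSome = true) ∧
  (∀ p ∈ dictionary, ∀ q ∈ dictionary, PySem.Str.len p.1 = PySem.Str.len word →
    PySem.Str.len q.1 = PySem.Str.len word → p.1 ≠ q.1 → PySem.Int.ofStrBase? p.1 2 ≠ PySem.Int.ofStrBase? q.1 2)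
instance (word : String) (w : String) (dictionary : List (String × Int)) : Decidable (Pre_length_word_checker word w dictionary) := by unfold Pre_length_word_checker; infer_instance

def pvWitness_length_word_checker : String × String × (List (String × Int)) := ("10", "1", [("11", 3), ("01", 0), ("110", 5)])

def Spec_length_word_checker (word : String) (w : String) (dictionary : List (String × Int)) (out : Int) : Prop := out = length_word_checker_alt word w dictionary
instance (word : String) (w : String) (dictionary : List (String × Int)) (out : Int) : Decidable (Spec_length_word_checker word w dictionary out) := by unfold Spec_length_word_checker; infer_instance

-- ===== CLAIM (what is proved, stated in full; the proofs are below) =====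
def Claim_equal_length_word_checker : Prop := ∀ (word : String) (w : String) (dictionary : List (String × Int)), Dom_length_word_checker word w dictionary → Pre_length_word_checker word w dictionary → Spec_length_word_checker word w dictionary (length_word_checker word w dictionary)

-- ===== LEMMAS AND PROOFS =====

-- list({value: index}.keys())[0] is value
theorem pv_singKey_pair (a : String) (v : Int) : pvSingKey (PySem.Dict.ofList [(a, v)]) = a := rfl

-- the candidate test, spelled as propositions
theorem pv_cand_iff (word w k : String) :
    pvCand word w k = true ↔
      PySem.Str.len k = PySem.Str.len word ∧ PySem.Str.startswith k w = true ∧ k ≠ word := by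
  simp [pvCand, Bool.and_eq_true, and_assoc]

-- membership in the keys of dict(dictionary)
theorem pv_mem_keys_ofList (l : List (String × Int)) (k : String) :
    k ∈ (PySem.Dict.ofList l).keys ↔ k ∈ l.map Prod.fst := by
  show k ∈ (PySem.Dict.empty.update l).keys ↔ _
  unfold PySem.Dict.update
  rw [PySem.Dict.keys_foldl_insert_key l Prod.fst (fun _ x => x.2) PySem.Dict.empty,
    PySem.Dict.keys_empty, PySem.Set.mem_update]
  simp

-- membership in a bucket of A's grouping fold
theorem pv_mem_groupfold (l : List (String × Int)) (g : PySem.Dict Int (List (PySem.Dict String Int)))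
    (c : Int) (x : PySem.Dict String Int) :
    x ∈ (l.foldl pvGroupStep g).getD c [] ↔
      x ∈ g.getD c [] ∨ ∃ p ∈ l, PySem.Str.len p.1 = c ∧ x = PySem.Dict.ofList [(p.1, p.2)] := by
  induction l generalizing g with
  | nil => simp
  | cons p l ih =>
    rw [List.foldl_cons, ih]
    have hstep : ∀ y, y ∈ (pvGroupStep g p).getD c [] ↔
        (if c = PySem.Str.len p.1 then
          (y ∈ g.getD (PySem.Str.len p.1) [] ∨ y = PySem.Dict.ofList [(p.1, p.2)])
        else y ∈ g.getD c []) := by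
      intro y
      unfold pvGroupStep
      rw [PySem.Dict.getD_modify]
      by_cases hc : c = PySem.Str.len p.1
      · rw [if_pos hc, if_pos hc]
        simp [PySem.List.mem_sorted]
      · rw [if_neg hc, if_neg hc]
    by_cases hc : c = PySem.Str.len p.1
    · subst hc
      rw [hstep x, if_pos rfl]
      constructor
      · rintro ((h | h) | ⟨q, hq, hlen, hx⟩)
        · exact Or.inl h
        · exact Or.inr ⟨p, List.mem_cons_self .., rfl, h⟩
        · exact Or.inr ⟨q, List.mem_cons_of_mem _ hq, hlen, hx⟩
      · rintro (h | ⟨q, hq, hlen, hx⟩)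
        · exact Or.inl (Or.inl h)
        · rcases List.mem_cons.mp hq with rfl | hq
          · exact Or.inl (Or.inr hx)
          · exact Or.inr ⟨q, hq, hlen, hx⟩
    · rw [hstep x, if_neg hc]
      constructor
      · rintro (h | ⟨q, hq, hlen, hx⟩)
        · exact Or.inl h
        · exact Or.inr ⟨q, List.mem_cons_of_mem _ hq, hlen, hx⟩
      · rintro (h | ⟨q, hq, hlen, hx⟩)
        · exact Or.inl h
        · rcases List.mem_cons.mp hq with rfl | hq
          · exact absurd hlen.symm hc
          · exact Or.inr ⟨q, hq, hlen, hx⟩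

-- A's scanning loop returns according to the LAST candidate of the list
theorem pv_foldA_spec (word w : String) (S : List String) (acc : Int) :
    (S.foldl (fun acc s =>
        if PySem.Str.startswith s w then
          if word < s then 0 else if s < word then 1 else acc
        else acc) acc) =
      (match (S.filter (fun s => PySem.Str.startswith s w && s != word)).getLast? with
        | none => acc
        | some m => if word < m then 0 else 1) := by
  induction S generalizing acc with
  | nil => simp
  | cons s S ih =>
    rw [List.foldl_cons, ih]
    by_cases hq : (PySem.Str.startswith s w && s != word) = true
    · have hfil : (s :: S).filter (fun s => PySem.Str.startswith s w && s != word)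
          = s :: S.filter (fun s => PySem.Str.startswith s w && s != word) := by
        simp only [List.filter_cons, hq]
        simp
      rw [hfil]
      rcases Bool.and_eq_true_iff.mp hq with ⟨h1, h2⟩
      have hs : s ≠ word := by simpa using h2
      cases hF : S.filter (fun s => PySem.Str.startswith s w && s != word) with
      | nil =>
        show (if PySem.Str.startswith s w = true then
            if word < s then 0 else if s < word then 1 else acc else acc) = if word < s then (0 : Int) else 1
        rw [if_pos h1]
        rcases lt_trichotomy word s with h | h | h
        · rw [if_pos h, if_pos h]
        · exact absurd h.symm hs
        · rw [if_neg (asymm h), if_neg (asymm h), if_pos h]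
      | cons f F =>
        rw [List.getLast?_cons_cons]
        cases hm : (f :: F).getLast? with
        | none => simp at hm
        | some m => rfl
    · have hfil : (s :: S).filter (fun s => PySem.Str.startswith s w && s != word)
          = S.filter (fun s => PySem.Str.startswith s w && s != word) := by
        have hqf : (PySem.Str.startswith s w && s != word) = false := by
          revert hq
          cases PySem.Str.startswith s w && s != word <;> simp
        simp only [List.filter_cons, hqf]
        simp
      rw [hfil]
      have hstep : (if PySem.Str.startswith s w = true then
          if word < s then 0 else if s < word then 1 else acc else acc) = acc := by
        by_cases h1 : PySem.Str.startswith s w = true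
        · have hsw : s = word := by
            by_contra hne
            exact hq (by simp only [h1, Bool.true_and, bne_iff_ne, ne_eq]; exact hne)
          subst hsw
          rw [if_pos h1, if_neg (lt_irrefl s), if_neg (lt_irrefl s)]
        · rw [if_neg h1]
      rw [hstep]

-- last element of a key-monotone list is key-maximal
theorem pv_getLast_max {L : List String} {m : String} (h : L.Pairwise (fun a b => pvBinKey a ≤ pvBinKey b))
    (hl : L.getLast? = some m) : m ∈ L ∧ ∀ x ∈ L, pvBinKey x ≤ pvBinKey m := by
  induction L with
  | nil => simp at hl
  | cons a L ih =>
    rcases List.pairwise_cons.mp h with ⟨ha, hL⟩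
    cases L with
    | nil =>
      simp only [List.getLast?_singleton, Option.some.injEq] at hl
      subst hl
      exact ⟨List.mem_singleton_self _, by simp⟩
    | cons b T =>
      rw [List.getLast?_cons_cons] at hl
      obtain ⟨hm, hmax⟩ := ih hL hl
      refine ⟨List.mem_cons_of_mem _ hm, ?_⟩
      intro x hx
      rcases List.mem_cons.mp hx with rfl | hx
      · exact ha m hm
      · exact hmax x hx

-- invariant of B's running-maximum loop, for a general start state
theorem pv_foldB_aux (word w : String) (l : List (String × Int)) :
    ∀ st : Option (String × Int),
    (st = none ∨ ∃ c, st = some (c, pvBinKey c) ∧ pvCand word w c = true) →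
    ((l.foldl (pvBStep word w) st) = st ∧ (∀ p ∈ l, pvCand word w p.1 = false)) ∨
    (∃ b, (l.foldl (pvBStep word w) st) = some (b, pvBinKey b) ∧ pvCand word w b = true ∧
      (b ∈ l.map Prod.fst ∨ st = some (b, pvBinKey b)) ∧
      (∀ p ∈ l, pvCand word w p.1 = true → pvBinKey p.1 ≤ pvBinKey b) ∧
      (∀ c, st = some (c, pvBinKey c) → pvBinKey c ≤ pvBinKey b)) := by
  induction l with
  | nil =>
    intro st _
    exact Or.inl ⟨rfl, by simp⟩
  | cons p l ih =>
    intro st hst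
    rw [List.foldl_cons]
    by_cases hc : pvCand word w p.1 = true
    · -- the state after this step
      obtain ⟨b0, hb0eq, hb0c, hb0le, hb0p, hb0st⟩ :
          ∃ b0, pvBStep word w st p = some (b0, pvBinKey b0) ∧ pvCand word w b0 = true ∧
            pvBinKey p.1 ≤ pvBinKey b0 ∧
            (∀ c, st = some (c, pvBinKey c) → (b0 = p.1 ∨ b0 = c) ∧ pvBinKey c ≤ pvBinKey b0) ∧
            (st = none → b0 = p.1) := by
        rcases hst with rfl | ⟨c, rfl, hcc⟩
        · exact ⟨p.1, by simp [pvBStep, hc], hc, le_refl _, by simp, fun _ => rfl⟩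
        · by_cases hlt : pvBinKey c < pvBinKey p.1
          · refine ⟨p.1, by simp [pvBStep, hc, hlt], hc, le_refl _, ?_, by simp⟩
            intro c' hc'
            obtain ⟨rfl, -⟩ : c = c' ∧ pvBinKey c = pvBinKey c' := by
              simpa using hc'
            exact ⟨Or.inl rfl, le_of_lt hlt⟩
          · refine ⟨c, by simp [pvBStep, hc, hlt], hcc, le_of_not_gt hlt, ?_, by simp⟩
            intro c' hc'
            obtain ⟨rfl, -⟩ : c = c' ∧ pvBinKey c = pvBinKey c' := by
              simpa using hc'
            exact ⟨Or.inr rfl, le_refl _⟩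
      rw [hb0eq]
      rcases ih (some (b0, pvBinKey b0)) (Or.inr ⟨b0, rfl, hb0c⟩) with ⟨heq, hall⟩ | ⟨b, heq, hbc, hbm, hmax, hstle⟩
      · refine Or.inr ⟨b0, heq, hb0c, ?_, ?_, ?_⟩
        · rcases hst with rfl | ⟨c, rfl, _⟩
          · exact Or.inl (by simp [hb0st rfl])
          · rcases (hb0p c rfl).1 with rfl | rfl
            · exact Or.inl (by simp)
            · exact Or.inr rfl
        · intro q hq hqc
          rcases List.mem_cons.mp hq with rfl | hq
          · exact hb0le
          · exact absurd hqc (by simp [hall q hq])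
        · intro c hcst
          exact (hb0p c hcst).2
      · refine Or.inr ⟨b, heq, hbc, ?_, ?_, ?_⟩
        · rcases hbm with hbm | hbm
          · exact Or.inl (List.mem_cons_of_mem _ hbm)
          · obtain ⟨rfl, -⟩ : b0 = b ∧ pvBinKey b0 = pvBinKey b := by simpa using hbm
            rcases hst with rfl | ⟨c, rfl, _⟩
            · exact Or.inl (by simp [hb0st rfl])
            · rcases (hb0p c rfl).1 with rfl | rfl
              · exact Or.inl (by simp)
              · exact Or.inr rfl
        · intro q hq hqc
          rcases List.mem_cons.mp hq with rfl | hq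
          · exact le_trans ‹pvBinKey q.1 ≤ pvBinKey b0› (hstle b0 rfl)
          · exact hmax q hq hqc
        · intro c hcst
          exact le_trans (hb0p c hcst).2 (hstle b0 rfl)
    · have hskip : pvBStep word w st p = st := by simp [pvBStep, hc]
      rw [hskip]
      rcases ih st hst with ⟨heq, hall⟩ | ⟨b, heq, hbc, hbm, hmax, hstle⟩
      · refine Or.inl ⟨heq, ?_⟩
        intro q hq
        rcases List.mem_cons.mp hq with rfl | hq
        · exact Bool.not_eq_true _ ▸ (by revert hc; cases pvCand word w q.1 <;> simp)
        · exact hall q hq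
      · refine Or.inr ⟨b, heq, hbc, ?_, ?_, hstle⟩
        · rcases hbm with hbm | hbm
          · exact Or.inl (List.mem_cons_of_mem _ hbm)
          · exact Or.inr hbm
        · intro q hq hqc
          rcases List.mem_cons.mp hq with rfl | hq
          · exact absurd hqc hc
          · exact hmax q hq hqc

-- B's loop: characterisation of the running maximum
theorem pv_foldB_spec (word w : String) (l : List (String × Int)) :
    (l.foldl (pvBStep word w) (none : Option (String × Int))) = none ∧ (∀ p ∈ l, pvCand word w p.1 = false) ∨
    (∃ b, (l.foldl (pvBStep word w) (none : Option (String × Int))) = some (b, pvBinKey b) ∧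
      b ∈ l.map Prod.fst ∧ pvCand word w b = true ∧
      ∀ p ∈ l, pvCand word w p.1 = true → pvBinKey p.1 ≤ pvBinKey b) := by
  rcases pv_foldB_aux word w l none (Or.inl rfl) with ⟨heq, hall⟩ | ⟨b, heq, hbc, hbm, hmax, _⟩
  · exact Or.inl ⟨heq, hall⟩
  · refine Or.inr ⟨b, heq, ?_, hbc, hmax⟩
    rcases hbm with hbm | hbm
    · exact hbm
    · exact absurd hbm (by simp)

-- ===== VERDICT (by name: the statement is the Claim_ definition above) =====
theorem length_word_checker_spec : Claim_equal_length_word_checker := by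
  unfold Claim_equal_length_word_checker
  intro word w dictionary _ hpre
  unfold Spec_length_word_checker length_word_checker length_word_checker_alt create_grouped_dict
  obtain ⟨hparse, hinj⟩ := hpre
  -- int(·,2) separates distinct same-length dictionary words (Pre_)
  have hinjkey : ∀ x y, x ∈ dictionary.map Prod.fst → y ∈ dictionary.map Prod.fst →
      PySem.Str.len x = PySem.Str.len word → PySem.Str.len y = PySem.Str.len word →
      pvBinKey x = pvBinKey y → x = y := by
    intro x y hx hy hlx hly hxy
    by_contra hne
    obtain ⟨p, hp, rfl⟩ := List.mem_map.mp hx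
    obtain ⟨q, hq, rfl⟩ := List.mem_map.mp hy
    obtain ⟨a, ha⟩ := Option.isSome_iff_exists.mp (hparse p hp hlx)
    obtain ⟨b, hb⟩ := Option.isSome_iff_exists.mp (hparse q hq hly)
    apply hinj p hp q hq hlx hly hne
    unfold pvBinKey at hxy
    rw [ha, hb] at hxy ⊢
    simpa using hxy
  -- the sorted same-length list of A
  have hmemS : ∀ x, x ∈ PySem.List.sorted
      ((((PySem.Dict.ofList dictionary).items.foldl pvGroupStep PySem.Dict.empty).getD
        (PySem.Str.len word) []).map pvSingKey) pvBinKey false ↔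
      (x ∈ dictionary.map Prod.fst ∧ PySem.Str.len x = PySem.Str.len word) := by
    intro x
    rw [PySem.List.mem_sorted, List.mem_map]
    constructor
    · rintro ⟨d, hd, rfl⟩
      rw [pv_mem_groupfold] at hd
      rcases hd with hd | ⟨p, hp, hlen, rfl⟩
      · rw [PySem.Dict.getD_empty] at hd
        exact absurd hd (List.not_mem_nil)
      · rw [pv_singKey_pair]
        refine ⟨?_, hlen⟩
        have hk : p.1 ∈ (PySem.Dict.ofList dictionary).keys := by
          simp only [PySem.Dict.keys]
          exact List.mem_map.mpr ⟨p, hp, rfl⟩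
        exact (pv_mem_keys_ofList dictionary p.1).mp hk
    · rintro ⟨hx, hlen⟩
      have hk : x ∈ (PySem.Dict.ofList dictionary).keys :=
        (pv_mem_keys_ofList dictionary x).mpr hx
      have : x ∈ (PySem.Dict.ofList dictionary).items.map Prod.fst := by
        simpa only [PySem.Dict.keys] using hk
      obtain ⟨q, hq, hq1⟩ := List.mem_map.mp this
      refine ⟨PySem.Dict.ofList [(q.1, q.2)], ?_, by rw [pv_singKey_pair, hq1]⟩
      rw [pv_mem_groupfold]
      exact Or.inr ⟨q, hq, by rw [hq1, hlen], rfl⟩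
    -- the two result computations
  dsimp only
  show (PySem.List.sorted
      ((((PySem.Dict.ofList dictionary).items.foldl pvGroupStep PySem.Dict.empty).getD
        (PySem.Str.len word) []).map pvSingKey) pvBinKey false).foldl
      (fun acc s =>
        if PySem.Str.startswith s w then
          if word < s then 0 else if s < word then 1 else acc
        else acc) (0 : Int) =
    (match dictionary.foldl (pvBStep word w) (none : Option (String × Int)) with
      | some bv => if bv.1 < word then 1 else 0
      | none => 0)
  rw [pv_foldA_spec]
  -- candidates of A are candidates of B and vice versa
  have hcandS : ∀ x, x ∈ (PySem.List.sorted
      ((((PySem.Dict.ofList dictionary).items.foldl pvGroupStep PySem.Dict.empty).getD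
        (PySem.Str.len word) []).map pvSingKey) pvBinKey false).filter
        (fun s => PySem.Str.startswith s w && s != word) ↔
      (x ∈ dictionary.map Prod.fst ∧ pvCand word w x = true) := by
    intro x
    rw [List.mem_filter, hmemS, pv_cand_iff]
    constructor
    · rintro ⟨⟨hx, hlen⟩, hq⟩
      rcases Bool.and_eq_true_iff.mp hq with ⟨h1, h2⟩
      exact ⟨hx, hlen, h1, by simpa using h2⟩
    · rintro ⟨hx, hlen, h1, h2⟩
      exact ⟨⟨hx, hlen⟩, by rw [Bool.and_eq_true]; exact ⟨h1, by simp [h2]⟩⟩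
  cases hf : ((PySem.List.sorted
      ((((PySem.Dict.ofList dictionary).items.foldl pvGroupStep PySem.Dict.empty).getD
        (PySem.Str.len word) []).map pvSingKey) pvBinKey false).filter
        (fun s => PySem.Str.startswith s w && s != word)).getLast? with
  | none =>
    have hFnil := List.getLast?_eq_none_iff.mp hf
    rcases pv_foldB_spec word w dictionary with ⟨heq, _⟩ | ⟨b, heq, hbm, hbc, _⟩
    · rw [heq]
    · exfalso
      have : b ∈ ((PySem.List.sorted
          ((((PySem.Dict.ofList dictionary).items.foldl pvGroupStep PySem.Dict.empty).getD
            (PySem.Str.len word) []).map pvSingKey) pvBinKey false).filter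
            (fun s => PySem.Str.startswith s w && s != word)) := (hcandS b).mpr ⟨hbm, hbc⟩
      rw [hFnil] at this
      exact List.not_mem_nil this
  | some m =>
    have hmF := pv_getLast_max (List.Pairwise.filter _ (PySem.List.sorted_pairwise _ pvBinKey)) hf
    obtain ⟨hmS, hmmax⟩ := hmF
    obtain ⟨hmdict, hmcand⟩ := (hcandS m).mp hmS
    rcases pv_foldB_spec word w dictionary with ⟨_, hall⟩ | ⟨b, heq, hbm, hbc, hmax⟩
    · exfalso
      obtain ⟨p, hp, hp1⟩ := List.mem_map.mp hmdict
      have := hall p hp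
      rw [hp1, hmcand] at this
      exact Bool.noConfusion this
    · -- the two maxima coincide
      have h1 : pvBinKey b ≤ pvBinKey m := hmmax b ((hcandS b).mpr ⟨hbm, hbc⟩)
      have h2 : pvBinKey m ≤ pvBinKey b := by
        obtain ⟨p, hp, hp1⟩ := List.mem_map.mp hmdict
        have := hmax p hp (by rw [hp1]; exact hmcand)
        rwa [hp1] at this
      have hbmlen := ((pv_cand_iff word w b).mp hbc).1
      have hmlen := ((pv_cand_iff word w m).mp hmcand).1
      have hbm_eq : m = b := hinjkey m b hmdict hbm hmlen hbmlen (le_antisymm h2 h1)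
      rw [heq, ← hbm_eq]
      have hmne : m ≠ word := ((pv_cand_iff word w m).mp hmcand).2.2
      show (if word < m then (0 : Int) else 1) = if m < word then (1 : Int) else 0
      rcases lt_trichotomy word m with h | h | h
      · rw [if_pos h, if_neg (asymm h)]
      · exact absurd h.symm hmne
      · rw [if_neg (asymm h), if_pos h]
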